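-- pv_equiv track=rewrite | github.com/swaseem2398/Class-activity-atom-camp | python_class_activity.py | count_distinct_pairs
-- ===== SOURCE A (Python) =====
-- def count_distinct_pairs(nums, target):
--     seen = set()
--     pairs = set()
--     for num in nums:
--         complement = target - num
--         if complement in seen:
--             pairs.add(tuple(sorted((num, complement))))
--         seen.add(num)
--     return len(pairs)
-- ===== SOURCE B (Python) =====
-- def count_distinct_pairs(nums, target):
--     # Count distinct value-pairs once over the distinct values, no per-prefix "seen" set:
--     # a pair {a,b} with a<b exists iff both values occur; the {h,h} pair needs h twice.
--     vals = set(nums)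
--     count = 0
--     for v in vals:
--         if 2 * v < target and target - v in vals:
--             count += 1
--     if target % 2 == 0 and nums.count(target // 2) >= 2:
--         count += 1
--     return count
-- ===== Notes on version B (the rewrite author's own statement) =====
-- stated objective: simpler
-- what changed: A scans the list maintaining a growing 'seen' set and a set of canonicalised pairs; B builds the distinct-value set once and counts values below half the target whose complement also occurs, adding one for a doubled half-value, so no pair set or prefix state is kept.
import Mathlib
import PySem

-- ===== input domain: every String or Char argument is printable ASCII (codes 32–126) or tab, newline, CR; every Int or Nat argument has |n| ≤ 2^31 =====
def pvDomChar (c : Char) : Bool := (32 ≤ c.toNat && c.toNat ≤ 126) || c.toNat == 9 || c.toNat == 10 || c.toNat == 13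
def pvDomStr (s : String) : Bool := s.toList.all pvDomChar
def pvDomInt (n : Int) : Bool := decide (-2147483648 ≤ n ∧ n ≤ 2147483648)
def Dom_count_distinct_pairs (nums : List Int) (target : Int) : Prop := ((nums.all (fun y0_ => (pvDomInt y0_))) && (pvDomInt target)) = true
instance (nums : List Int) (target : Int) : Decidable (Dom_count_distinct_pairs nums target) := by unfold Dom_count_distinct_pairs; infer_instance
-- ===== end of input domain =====

-- B replaces A's prefix-scan with a growing "seen" set and a pair set by a single count over the
-- distinct values (values below half the target with an occurring complement, plus a doubled half):
-- objective simpler, same expected cost.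


-- ===== PORT A =====
-- A: for each num, if target-num was seen before, record the sorted pair; return the pair count.
def count_distinct_pairs (nums : List Int) (target : Int) : Int :=
  let st := nums.foldl
    (fun (st : PySem.Set Int × PySem.Set (Int × Int)) num =>
      let complement := target - num
      let pairs := if complement ∈ st.1 then
          PySem.Set.add st.2 (if num ≤ complement then (num, complement) else (complement, num))
        else st.2
      (PySem.Set.add st.1 num, pairs))
    (PySem.Set.empty, PySem.Set.empty)
  (st.2.length : Int)

-- ===== PORT B =====
def count_distinct_pairs_alt (nums : List Int) (target : Int) : Int :=
  let vals : PySem.Set Int := PySem.Set.ofList nums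
  let count := vals.foldl
    (fun (acc : Int) v => if 2 * v < target ∧ (target - v) ∈ vals then acc + 1 else acc) 0
  if PySem.Int.mod target 2 = 0 ∧ 2 ≤ PySem.List.count nums (PySem.Int.floordiv target 2) then
    count + 1
  else count

-- ===== PRECONDITION & SPEC =====
def Spec_count_distinct_pairs (nums : List Int) (target : Int) (out : Int) : Prop := out = count_distinct_pairs_alt nums target
instance (nums : List Int) (target : Int) (out : Int) : Decidable (Spec_count_distinct_pairs nums target out) := by unfold Spec_count_distinct_pairs; infer_instance

-- ===== CLAIM (what is proved, stated in full; the proofs are below) =====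
def Claim_equal_count_distinct_pairs : Prop := ∀ (nums : List Int) (target : Int), Dom_count_distinct_pairs nums target → Spec_count_distinct_pairs nums target (count_distinct_pairs nums target)

-- ===== LEMMAS AND PROOFS =====

-- A's loop body, named so the proofs can speak about the fold.
def stepA (target : Int) (st : PySem.Set Int × PySem.Set (Int × Int)) (num : Int) :
    PySem.Set Int × PySem.Set (Int × Int) :=
  let complement := target - num
  let pairs := if complement ∈ st.1 then
      PySem.Set.add st.2 (if num ≤ complement then (num, complement) else (complement, num))
    else st.2
  (PySem.Set.add st.1 num, pairs)

lemma count_distinct_pairs_eq (nums : List Int) (target : Int) :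
    count_distinct_pairs nums target
      = ((nums.foldl (stepA target) (PySem.Set.empty, PySem.Set.empty)).2.length : Int) := rfl

-- the pairs A has recorded after the whole scan, characterised by the input alone
def goodPair (nums : List Int) (target a b : Int) : Prop :=
  a ≤ b ∧ a + b = target ∧
    ((a < b ∧ a ∈ nums ∧ b ∈ nums) ∨ (a = b ∧ 2 ≤ nums.count a))

lemma fst_foldl_stepA (target : Int) (p : List Int) (s : PySem.Set Int)
    (q : PySem.Set (Int × Int)) :
    (p.foldl (stepA target) (s, q)).1 = PySem.Set.update s p := by
  induction p generalizing s q with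
  | nil => rfl
  | cons x xs ih =>
      simp only [List.foldl_cons, stepA, PySem.Set.update_cons]
      exact ih _ _

lemma snd_foldl_stepA_nodup (target : Int) (p : List Int) (s : PySem.Set Int)
    (q : PySem.Set (Int × Int)) (hq : q.Nodup) :
    (p.foldl (stepA target) (s, q)).2.Nodup := by
  induction p generalizing s q with
  | nil => exact hq
  | cons x xs ih =>
      simp only [List.foldl_cons, stepA]
      apply ih
      split
      · exact PySem.Set.nodup_add _ _ hq
      · exact hq

lemma mem_snd_foldl_stepA (target : Int) (p : List Int) (a b : Int) :
    (a, b) ∈ (p.foldl (stepA target) (PySem.Set.empty, PySem.Set.empty)).2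
      ↔ goodPair p target a b := by
  induction p using List.reverseRecOn with
  | nil =>
      simp [goodPair, PySem.Set.empty]
  | append_singleton p x ih =>
      rw [List.foldl_append]
      have hfst : (p.foldl (stepA target) (PySem.Set.empty, PySem.Set.empty)).1
          = PySem.Set.ofList p := by
        rw [fst_foldl_stepA]; exact (PySem.Set.update_empty p)
      simp only [List.foldl_cons, List.foldl_nil, stepA]
      rw [hfst]
      by_cases hc : (target - x) ∈ PySem.Set.ofList p
      · rw [if_pos hc, PySem.Set.mem_add, ih]
        rw [PySem.Set.mem_ofList] at hc
        constructor
        · rintro (hg | hnew)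
          · obtain ⟨hab, hsum, hrest⟩ := hg
            refine ⟨hab, hsum, ?_⟩
            rcases hrest with ⟨h1, h2, h3⟩ | ⟨h1, h2⟩
            · exact Or.inl ⟨h1, List.mem_append_left _ h2, List.mem_append_left _ h3⟩
            · exact Or.inr ⟨h1, by rw [List.count_append]; omega⟩
          · by_cases hle : x ≤ target - x
            · rw [if_pos hle, Prod.mk.injEq] at hnew
              obtain ⟨ha, hb⟩ := hnew
              subst ha
              refine ⟨by omega, by omega, ?_⟩
              by_cases heq : a = target - a
              · refine Or.inr ⟨by omega, ?_⟩
                rw [List.count_append, List.count_singleton]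
                have hcnt : 0 < p.count a := List.count_pos_iff.mpr (by
                  have : target - a = a := by omega
                  exact this ▸ hc)
                simp only [BEq.rfl, if_pos]
                omega
              · exact Or.inl ⟨by omega, List.mem_append_right _ (List.mem_singleton.mpr rfl),
                  by rw [hb]; exact List.mem_append_left _ hc⟩
            · rw [if_neg hle, Prod.mk.injEq] at hnew
              obtain ⟨ha, hb⟩ := hnew
              subst hb
              refine ⟨by omega, by omega, ?_⟩
              exact Or.inl ⟨by omega, by rw [ha]; exact List.mem_append_left _ hc,
                List.mem_append_right _ (List.mem_singleton.mpr rfl)⟩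
        · rintro ⟨hab, hsum, hrest⟩
          rcases hrest with ⟨hlt, ha, hb⟩ | ⟨heq, hcnt⟩
          · rw [List.mem_append, List.mem_singleton] at ha hb
            rcases ha with ha | ha
            · rcases hb with hb | hb
              · exact Or.inl ⟨hab, hsum, Or.inl ⟨hlt, ha, hb⟩⟩
              · -- b = x, a ∈ p : pair added now; here target - x = a < x
                right
                rw [if_neg (by omega : ¬ x ≤ target - x), Prod.mk.injEq]
                omega
            · rcases hb with hb | hb
              · -- a = x, b ∈ p : b = target - x and x < b
                right
                rw [if_pos (by omega : x ≤ target - x), Prod.mk.injEq]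
                omega
              · omega
          · subst heq
            rw [List.count_append, List.count_singleton] at hcnt
            by_cases hxa : x = a
            · by_cases h2 : 2 ≤ p.count a
              · exact Or.inl ⟨hab, hsum, Or.inr ⟨rfl, h2⟩⟩
              · right
                rw [if_pos (by omega : x ≤ target - x), Prod.mk.injEq]
                omega
            · left
              refine ⟨hab, hsum, Or.inr ⟨rfl, ?_⟩⟩
              simp only [beq_iff_eq, if_neg hxa] at hcnt
              omega
      · rw [if_neg hc, ih]
        rw [PySem.Set.mem_ofList] at hc
        unfold goodPair
        constructor
        · rintro ⟨hab, hsum, hrest⟩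
          refine ⟨hab, hsum, ?_⟩
          rcases hrest with ⟨h1, h2, h3⟩ | ⟨h1, h2⟩
          · exact Or.inl ⟨h1, List.mem_append_left _ h2, List.mem_append_left _ h3⟩
          · exact Or.inr ⟨h1, by rw [List.count_append]; omega⟩
        · rintro ⟨hab, hsum, hrest⟩
          refine ⟨hab, hsum, ?_⟩
          rcases hrest with ⟨hlt, ha, hb⟩ | ⟨heq, hcnt⟩
          · rw [List.mem_append, List.mem_singleton] at ha hb
            rcases ha with ha | ha
            · rcases hb with hb | hb
              · exact Or.inl ⟨hlt, ha, hb⟩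
              · exact absurd (show target - x ∈ p from by
                  have : target - x = a := by omega
                  exact this ▸ ha) hc
            · rcases hb with hb | hb
              · exact absurd (show target - x ∈ p from by
                  have : target - x = b := by omega
                  exact this ▸ hb) hc
              · omega
          · subst heq
            rw [List.count_append, List.count_singleton] at hcnt
            by_cases hxa : x = a
            · exfalso
              apply hc
              have hx2 : target - x = x := by omega
              rw [hx2, hxa]
              apply List.count_pos_iff.mp
              subst hxa
              simp only [BEq.rfl, if_pos] at hcnt
              omega
            · refine Or.inr ⟨rfl, ?_⟩
              simp only [beq_iff_eq, if_neg hxa] at hcnt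
              omega

-- B's count, as the canonical list of pairs it enumerates
def canon (nums : List Int) (target : Int) : List (Int × Int) :=
  ((PySem.Set.ofList nums).filter
      (fun v => decide (2 * v < target ∧ (target - v) ∈ PySem.Set.ofList nums))).map
    (fun v => (v, target - v))
  ++ (if PySem.Int.mod target 2 = 0 ∧ 2 ≤ nums.count (PySem.Int.floordiv target 2) then
        [(PySem.Int.floordiv target 2, PySem.Int.floordiv target 2)] else [])

lemma half_char {target h : Int} (hsum : h + h = target) :
    PySem.Int.mod target 2 = 0 ∧ PySem.Int.floordiv target 2 = h := by
  constructor
  · exact (PySem.Int.mod_eq_zero_iff_dvd target 2).mpr ⟨h, by omega⟩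
  · rw [PySem.Int.floordiv_eq_iff_of_pos (by omega)]; omega

lemma mem_canon (nums : List Int) (target : Int) (a b : Int) :
    (a, b) ∈ canon nums target ↔ goodPair nums target a b := by
  unfold canon goodPair
  rw [List.mem_append, List.mem_map]
  constructor
  · rintro (⟨v, hv, hpair⟩ | hdiag)
    · rw [List.mem_filter, PySem.Set.mem_ofList] at hv
      obtain ⟨hvmem, hcond⟩ := hv
      rw [decide_eq_true_iff, PySem.Set.mem_ofList] at hcond
      rw [Prod.mk.injEq] at hpair
      obtain ⟨ha, hb⟩ := hpair
      subst ha
      refine ⟨by omega, by omega, Or.inl ⟨by omega, hvmem, hb ▸ hcond.2⟩⟩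
    · split at hdiag
      · rename_i hd
        rw [List.mem_singleton, Prod.mk.injEq] at hdiag
        obtain ⟨ha, hb⟩ := hdiag
        obtain ⟨hev, hcnt⟩ := hd
        have h2 : 2 ∣ target := (PySem.Int.mod_eq_zero_iff_dvd target 2).mp hev
        obtain ⟨h, hh⟩ := h2
        have hfd : PySem.Int.floordiv target 2 = h := (half_char (by omega)).2
        refine ⟨by omega, by omega, Or.inr ⟨by omega, by rw [ha]; exact hcnt⟩⟩
      · simp at hdiag
  · rintro ⟨hab, hsum, hrest⟩
    rcases hrest with ⟨hlt, ha, hb⟩ | ⟨heq, hcnt⟩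
    · left
      refine ⟨a, ?_, by rw [show target - a = b from by omega]⟩
      rw [List.mem_filter, PySem.Set.mem_ofList, decide_eq_true_iff, PySem.Set.mem_ofList]
      exact ⟨ha, by omega, by rw [show target - a = b from by omega]; exact hb⟩
    · right
      subst heq
      obtain ⟨hev, hfd⟩ := half_char hsum
      rw [if_pos ⟨hev, hfd ▸ hcnt⟩, List.mem_singleton, Prod.mk.injEq]
      omega

lemma canon_nodup (nums : List Int) (target : Int) : (canon nums target).Nodup := by
  unfold canon
  apply List.Nodup.append
  · exact ((PySem.Set.nodup_ofList nums).filter _).map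
      (fun v w h => by simpa using congrArg Prod.fst h)
  · split <;> simp
  · intro y hy hz
    rw [List.mem_map] at hy
    obtain ⟨v, hv, hpair⟩ := hy
    rw [List.mem_filter, decide_eq_true_iff] at hv
    split at hz
    · rename_i hd
      rw [List.mem_singleton] at hz
      subst hz
      rw [Prod.mk.injEq] at hpair
      have hlt : 2 * v < target := hv.2.1
      have hh : PySem.Int.floordiv target 2 * 2 ≤ target ∧
          target < (PySem.Int.floordiv target 2 + 1) * 2 :=
        (PySem.Int.floordiv_eq_iff_of_pos (by omega)).mp rfl
      have h2 : 2 ∣ target := (PySem.Int.mod_eq_zero_iff_dvd target 2).mp hd.1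
      omega
    · simp at hz

lemma pairs_length_eq_canon (nums : List Int) (target : Int) :
    (nums.foldl (stepA target) (PySem.Set.empty, PySem.Set.empty)).2.length
      = (canon nums target).length := by
  apply List.Perm.length_eq
  rw [List.perm_ext_iff_of_nodup
        (snd_foldl_stepA_nodup target nums _ _ (by simp [PySem.Set.empty]))
        (canon_nodup nums target)]
  rintro ⟨a, b⟩
  rw [mem_snd_foldl_stepA, mem_canon]

lemma foldl_ite_count (p : Int → Prop) [DecidablePred p] (l : List Int) :
    l.foldl (fun (acc : Int) v => if p v then acc + 1 else acc) 0
      = ((l.countP (fun v => decide (p v)) : Nat) : Int) := by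
  simpa only [decide_eq_true_eq, zero_add] using PySem.List.foldl_count_if (fun v => decide (p v)) l 0

-- ===== VERDICT (by name: the statement is the Claim_ definition above) =====
lemma alt_eq (nums : List Int) (target : Int) :
    count_distinct_pairs_alt nums target
      = (if PySem.Int.mod target 2 = 0 ∧ 2 ≤ PySem.List.count nums (PySem.Int.floordiv target 2)
          then ((PySem.Set.ofList nums).foldl
              (fun (acc : Int) v =>
                if 2 * v < target ∧ (target - v) ∈ PySem.Set.ofList nums then acc + 1 else acc) 0) + 1
          else (PySem.Set.ofList nums).foldl
              (fun (acc : Int) v =>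
                if 2 * v < target ∧ (target - v) ∈ PySem.Set.ofList nums then acc + 1 else acc) 0) := rfl

theorem count_distinct_pairs_spec : Claim_equal_count_distinct_pairs := by
  intro nums target _
  show count_distinct_pairs nums target = count_distinct_pairs_alt nums target
  rw [count_distinct_pairs_eq, pairs_length_eq_canon, alt_eq,
      foldl_ite_count (fun v => 2 * v < target ∧ (target - v) ∈ PySem.Set.ofList nums)]
  unfold canon
  rw [List.length_append, List.length_map, ← List.countP_eq_length_filter,
      PySem.List.count_eq]
  split
  · simp
  · simp
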